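-- pv_equiv track=rewrite | github.com/Project-Phaistos/Ventris1 | pillar5/scripts/test_r2_filtered_stability.py | build_chains_from_signs
-- ===== SOURCE A (Python) =====
-- def build_chains_from_signs(sign_sequences: list[str]) -> dict[str, list[str]]:
--     """Build progressive chains from sign sequences (dash-separated)."""
--     sorted_signs = sorted(set(sign_sequences), key=lambda s: (len(s), s))
--     chains: dict[str, list[str]] = {}
--     sign_to_root: dict[str, str] = {}
--
--     for sign_seq in sorted_signs:
--         placed = False
--         parts = sign_seq.split("-")
--         for prefix_len in range(len(parts) - 1, 0, -1):
--             prefix = "-".join(parts[:prefix_len])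
--             if prefix in sign_to_root:
--                 root = sign_to_root[prefix]
--                 chains[root].append(sign_seq)
--                 sign_to_root[sign_seq] = root
--                 placed = True
--                 break
--         if not placed:
--             chains[sign_seq] = [sign_seq]
--             sign_to_root[sign_seq] = sign_seq
--
--     for root in chains:
--         chains[root].sort(key=lambda s: len(s))
--     return chains
-- ===== SOURCE B (Python) =====
-- def build_chains_from_signs(sign_sequences: list[str]) -> dict[str, list[str]]:
--     """Build progressive chains from sign sequences (dash-separated).
--
--     A prefix TRIE over the dash-separated parts replaces A's per-sequence
--     probing of prefix strings against a dict: each node is [children, term]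
--     where term is the chain root assigned to the sequence ending there.
--     Descending a sequence's parts once finds the deepest marked proper
--     prefix (its term is already the final root, so no root dict is needed),
--     and each chain, filled in (len, s) order, is already length-sorted.
--     """
--     trie = [{}, None]  # node = [children: dict part -> node, term: root string or None]
--     chains: dict[str, list[str]] = {}
--     for seq in sorted(set(sign_sequences), key=lambda s: (len(s), s)):
--         node, best = trie, None
--         parts = seq.split("-")
--         for i, part in enumerate(parts):
--             if i > 0 and node[1] is not None:
--                 best = node[1]  # deepest marked proper prefix so far
--             if part not in node[0]:
--                 node[0][part] = [{}, None]
--             node = node[0][part]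
--         root = best if best is not None else seq
--         node[1] = root
--         chains.setdefault(root, []).append(seq)
--     return chains
-- ===== Notes on version B (the rewrite author's own statement) =====
-- stated objective: alternative
-- what changed: B replaces A's dict of joined prefix strings (probed by re-joining parts[:k] for k = len-1..1 and the final per-chain sort) with a prefix trie over the dash-separated parts whose terminal nodes store the chain root: one descent per sequence finds the deepest marked proper prefix and yields the root directly, and the final per-chain len-sort is dropped because chains fill in (len, s) order.
import Mathlib
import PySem

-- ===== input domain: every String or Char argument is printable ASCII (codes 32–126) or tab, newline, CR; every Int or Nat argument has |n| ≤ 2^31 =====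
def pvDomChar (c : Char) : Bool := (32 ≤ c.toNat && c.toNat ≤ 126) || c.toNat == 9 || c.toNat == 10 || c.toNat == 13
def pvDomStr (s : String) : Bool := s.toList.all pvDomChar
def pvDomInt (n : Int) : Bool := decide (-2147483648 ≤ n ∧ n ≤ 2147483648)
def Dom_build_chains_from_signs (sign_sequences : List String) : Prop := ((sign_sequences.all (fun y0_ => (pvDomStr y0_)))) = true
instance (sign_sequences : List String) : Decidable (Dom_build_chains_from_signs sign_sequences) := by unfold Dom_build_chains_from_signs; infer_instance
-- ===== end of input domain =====

-- B replaces A's per-sequence probing of joined prefix strings against a sign_to_root dict by a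
-- prefix TRIE over the dash-separated parts: terminal nodes store the chain root directly, one
-- descent finds the deepest marked proper prefix, and the final per-chain sort (an identity,
-- since chains fill in (len, s) order) is dropped. Objective: alternative data structure.

-- ===== PORT A =====
-- inner loop `for prefix_len in range(len(parts)-1, 0, -1): ... break`: first prefix found in sign_to_root
def aFindPrefix (s2r : PySem.Dict String String) (parts : List (List Char)) : List Int → Option String
  | [] => none
  | k :: ks =>
    let pre := String.ofList (PySem.Chars.join ['-'] (PySem.List.slice parts none (some k)))
    if s2r.contains pre then some pre else aFindPrefix s2r parts ks

-- one iteration of A's main loop over (chains, sign_to_root)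
def aStep (st : PySem.Dict String (List String) × PySem.Dict String String) (seq : String) :
    PySem.Dict String (List String) × PySem.Dict String String :=
  let parts := PySem.Chars.splitOn seq.toList ['-']
  match aFindPrefix st.2 parts (PySem.List.pyRange ((parts.length : Int) - 1) 0 (-1)) with
  | some pre =>
    let root := (st.2.get? pre).getD ""
    (st.1.modify root [] (fun l => l ++ [seq]), st.2.insert seq root)
  | none => (st.1.insert seq [seq], st.2.insert seq seq)

def build_chains_from_signs (sign_sequences : List String) : List (String × List String) :=
  let sorted_signs := PySem.List.sorted2 (PySem.Set.ofList sign_sequences) PySem.Str.len (fun s => s) false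
  let chains := (sorted_signs.foldl aStep (PySem.Dict.empty, PySem.Dict.empty)).1
  -- `for root in chains: chains[root].sort(key=len)`
  (chains.keys.foldl (fun d root => d.modify root [] (fun l => PySem.List.sorted l PySem.Str.len false)) chains).items

-- ===== PORT B =====
-- trie node `[children, term]`: children keyed by a dash-separated part, term = chain root or None
mutual
inductive PvTrie where
  | node : Option String → PvChildren → PvTrie
inductive PvChildren where
  | nil : PvChildren
  | cons : List Char → PvTrie → PvChildren → PvChildren
end

-- `node[0].get(part)` on the children dict
def pvChildGet : PvChildren → List Char → Option PvTrie
  | PvChildren.nil, _ => none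
  | PvChildren.cons k t rest, p => if k = p then some t else pvChildGet rest p

-- `node[0][part] = child` (overwrite in place, new keys append)
def pvChildSet : PvChildren → List Char → PvTrie → PvChildren
  | PvChildren.nil, p, v => PvChildren.cons p v PvChildren.nil
  | PvChildren.cons k t rest, p, v =>
    if k = p then PvChildren.cons k v rest else PvChildren.cons k t (pvChildSet rest p v)

-- B's inner `for i, part in enumerate(parts)` loop: descend (creating nodes), track the deepest
-- marked proper prefix in `best`, then set the terminal's term to the root; returns (root, trie')
def pvPlace (seq : String) : List (List Char) → PvTrie → Nat → Option String → String × PvTrie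
  | [], PvTrie.node _ ch, _, best =>
    let root := best.getD seq
    (root, PvTrie.node (some root) ch)
  | p :: rest, PvTrie.node term ch, i, best =>
    let best' := if 0 < i then (match term with | some v => some v | none => best) else best
    let child := (pvChildGet ch p).getD (PvTrie.node none PvChildren.nil)
    let res := pvPlace seq rest child (i + 1) best'
    (res.1, PvTrie.node term (pvChildSet ch p res.2))

-- one iteration of B's main loop over (trie, chains)
def bStep (st : PvTrie × PySem.Dict String (List String)) (seq : String) :
    PvTrie × PySem.Dict String (List String) :=
  let parts := PySem.Chars.splitOn seq.toList ['-']
  let res := pvPlace seq parts st.1 0 none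
  (res.2, st.2.modify res.1 [] (fun l => l ++ [seq]))

def build_chains_from_signs_alt (sign_sequences : List String) : List (String × List String) :=
  (((PySem.List.sorted2 (PySem.Set.ofList sign_sequences) PySem.Str.len (fun s => s) false).foldl
      bStep (PvTrie.node none PvChildren.nil, PySem.Dict.empty)).2).items

-- ===== PRECONDITION & SPEC =====
def Spec_build_chains_from_signs (sign_sequences : List String) (out : List (String × List String)) : Prop := out = build_chains_from_signs_alt sign_sequences
instance (sign_sequences : List String) (out : List (String × List String)) : Decidable (Spec_build_chains_from_signs sign_sequences out) := by unfold Spec_build_chains_from_signs; infer_instance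

-- ===== CLAIM (what is proved, stated in full; the proofs are below) =====
def Claim_equal_build_chains_from_signs : Prop := ∀ (sign_sequences : List String), Dom_build_chains_from_signs sign_sequences → Spec_build_chains_from_signs sign_sequences (build_chains_from_signs sign_sequences)

-- ===== LEMMAS AND PROOFS =====

-- the lexicographic key sorted2 sorts by
def pvKey (s : String) : Lex (Int × String) := toLex (PySem.Str.len s, s)

-- the proper dash-prefix strings of a split sequence, shortest first
def ppStrs (parts : List (List Char)) : List String :=
  (List.range (parts.length - 1)).map (fun j => String.ofList (PySem.Chars.join ['-'] (parts.take (j + 1))))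

-- read-only descent: the term stored at the end of a path, none if the path is absent
def trieTerm : List (List Char) → PvTrie → Option String
  | [], PvTrie.node t _ => t
  | p :: rest, PvTrie.node _ ch => trieTerm rest ((pvChildGet ch p).getD (PvTrie.node none PvChildren.nil))

-- the best value pvPlace computes, as a read-only function (proof-side mirror)
def pvBest : List (List Char) → PvTrie → Nat → Option String → Option String
  | [], _, _, best => best
  | p :: rest, PvTrie.node term ch, i, best =>
    pvBest rest ((pvChildGet ch p).getD (PvTrie.node none PvChildren.nil)) (i + 1)
      (if 0 < i then (match term with | some v => some v | none => best) else best)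

-- loop invariant on A's state, indexed by the list `done` of already-processed sequences
def pvInv (done : List String) (c : PySem.Dict String (List String)) (r : PySem.Dict String String) : Prop :=
  r.keys = done ∧
  (∀ p ∈ c.items, ∀ x ∈ p.2, x ∈ done) ∧
  (∀ p ∈ c.items, p.2.Pairwise (fun a b => PySem.Str.len a ≤ PySem.Str.len b)) ∧
  (∀ k ∈ c.keys, k ∈ done) ∧
  (∀ v ∈ r.values, v ∈ c.keys) ∧
  c.keys.Nodup

-- the trie stores exactly A's sign_to_root dict: term at path split(s) = r[s]
def pvTrieInv (t : PvTrie) (r : PySem.Dict String String) : Prop :=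
  ∀ s : List Char, trieTerm (PySem.Chars.splitOn s ['-']) t = r.get? (String.ofList s)

theorem go_spec (fuel : Nat) (l cur : List Char) (accs : List (List Char)) (h : l.length ≤ fuel) :
    PySem.Chars.splitOn.go ['-'] fuel l cur accs = accs.reverse ++ (List.splitOn '-' l).modifyHead (cur.reverse ++ ·) := by
  induction fuel generalizing l cur accs with
  | zero =>
    have hl : l = [] := by simpa using h
    subst hl
    simp [PySem.Chars.splitOn.go, List.splitOn, List.splitOnP_nil]
  | succ n ih =>
    cases l with
    | nil => simp [PySem.Chars.splitOn.go, List.splitOn, List.splitOnP_nil]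
    | cons c rest =>
      by_cases hc : c = '-'
      · subst hc
        rw [show PySem.Chars.splitOn.go ['-'] (n+1) ('-' :: rest) cur accs
              = PySem.Chars.splitOn.go ['-'] n (List.drop 1 ('-'::rest)) [] (cur.reverse :: accs) by
            simp [PySem.Chars.splitOn.go, List.isPrefixOf]]
        rw [ih _ _ _ (by simpa using Nat.le_of_succ_le_succ (by simpa using h))]
        simp only [List.splitOn, List.splitOnP_cons, beq_self_eq_true, if_pos]
        rcases hs : List.splitOnP (fun x => x == '-') rest with _ | ⟨a, b⟩
        · exact absurd hs (List.splitOnP_ne_nil _ _)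
        · simp [hs]
      · rw [show PySem.Chars.splitOn.go ['-'] (n+1) (c :: rest) cur accs
              = PySem.Chars.splitOn.go ['-'] n rest (c :: cur) accs by
            simp only [PySem.Chars.splitOn.go, List.isPrefixOf]
            rw [if_neg]
            simp [Ne.symm hc]]
        rw [ih _ _ _ (by simpa using Nat.le_of_succ_le_succ (by simpa using h))]
        have hne := List.splitOnP_ne_nil (fun x => x == '-') rest
        rcases hs : List.splitOnP (fun x => x == '-') rest with _ | ⟨h1, t1⟩
        · exact absurd hs hne
        · simp [List.splitOn, List.splitOnP_cons, hc, hs]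

theorem chars_splitOn_dash (s : List Char) : PySem.Chars.splitOn s ['-'] = List.splitOn '-' s := by
  rw [PySem.Chars.splitOn, go_spec _ _ _ _ (by omega)]
  rcases hs : List.splitOn '-' s with _ | ⟨h1, t1⟩
  · exact absurd hs (List.splitOnP_ne_nil _ _)
  · simp

theorem splitOn_dash_ne_nil (s : List Char) : PySem.Chars.splitOn s ['-'] ≠ [] := by
  rw [chars_splitOn_dash]; exact List.splitOnP_ne_nil _ _

theorem joinDash_splitOn (s : List Char) :
    PySem.Chars.join ['-'] (PySem.Chars.splitOn s ['-']) = s := by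
  rw [chars_splitOn_dash]
  simpa [PySem.Chars.join] using List.intercalate_splitOn s '-'

-- the parts produced by split("-") contain no dash
theorem splitOn_dashfree (s : List Char) : ∀ p ∈ PySem.Chars.splitOn s ['-'], '-' ∉ p := by
  rw [chars_splitOn_dash]
  induction s with
  | nil => intro p hp; simp [List.splitOn, List.splitOnP_nil] at hp; simp [hp]
  | cons c rest ih =>
    intro p hp
    by_cases hc : c = '-'
    · subst hc
      rw [List.splitOn, List.splitOnP_cons] at hp
      simp at hp
      rcases hp with rfl | hp
      · simp
      · exact ih p hp
    · rw [List.splitOn, List.splitOnP_cons] at hp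
      simp [hc] at hp
      rcases hs : List.splitOnP (fun x => x == '-') rest with _ | ⟨h1, t1⟩
      · exact absurd hs (List.splitOnP_ne_nil _ _)
      · rw [hs] at hp
        simp at hp
        rcases hp with rfl | hp
        · intro hm
          rcases List.mem_cons.mp hm with h | h
          · exact hc h.symm
          · exact ih h1 (by rw [List.splitOn, hs]; simp) h
        · exact ih p (by rw [List.splitOn, hs]; simp [hp])

-- split after join is the identity on nonempty dash-free part lists
theorem canon_split_join (ps : List (List Char)) (h1 : ps ≠ []) (h2 : ∀ p ∈ ps, '-' ∉ p) :
    PySem.Chars.splitOn (PySem.Chars.join ['-'] ps) ['-'] = ps := by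
  rw [chars_splitOn_dash]
  simpa [PySem.Chars.join, List.intercalate] using List.splitOn_intercalate ps '-' h2 h1

theorem sorted2_eq_sorted_lex (xs : List String) :
    PySem.List.sorted2 xs PySem.Str.len (fun s => s) false = PySem.List.sorted xs pvKey false := by
  unfold PySem.List.sorted2 PySem.List.sorted
  simp only [Bool.false_eq_true, if_false]
  congr 1
  funext acc x
  congr 1
  funext a b
  by_cases h3 : a < b <;> simp [pvKey, Prod.Lex.lt_iff, h3] <;>
    rcases Nat.lt_trichotomy a.length b.length with h | h | h <;>
    first
      | (simp [h, Nat.lt_asymm h]; done)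
      | (simp [h]; done)
      | (simp [Nat.lt_asymm h, h, Nat.ne_of_lt' h])

theorem aFindPrefix_eq_find? (r : PySem.Dict String String) (parts : List (List Char)) (ks : List Int) :
    aFindPrefix r parts ks
      = (ks.map (fun k => String.ofList (PySem.Chars.join ['-'] (PySem.List.slice parts none (some k))))).find?
          (fun q => r.contains q) := by
  induction ks with
  | nil => simp [aFindPrefix]
  | cons k ks ih =>
    simp only [aFindPrefix, List.map_cons, List.find?_cons]
    by_cases h : r.contains (String.ofList (PySem.Chars.join ['-'] (PySem.List.slice parts none (some k)))) <;>
      simp [h, ih]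

theorem aFind_eq (r : PySem.Dict String String) (parts : List (List Char)) :
    aFindPrefix r parts (PySem.List.pyRange ((parts.length : Int) - 1) 0 (-1))
      = (ppStrs parts).reverse.find? (fun q => r.contains q) := by
  rw [aFindPrefix_eq_find?]
  have h1 : PySem.List.pyRange ((parts.length : Int) - 1) 0 (-1)
      = (PySem.List.pyRange 1 (parts.length : Int) 1).reverse := by
    rw [PySem.List.pyRange_neg_one_eq_reverse]
    norm_num
  rw [h1, List.map_reverse]
  congr 1
  rw [show PySem.List.pyRange 1 (parts.length : Int) 1 = PySem.List.pyRange 1 (parts.length : Int) from rfl,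
      PySem.List.pyRange_one, List.map_map, ppStrs]
  rw [show ((parts.length : Int) - 1).toNat = parts.length - 1 from by omega]
  congr 1
  apply List.map_congr_left
  intro j hj
  simp only [Function.comp_apply]
  rw [PySem.List.slice_to _ (by positivity)]
  rw [show ((1 : Int) + (j : Int)).toNat = j + 1 from by omega]

theorem keyle_strlen {a b : String} (h : pvKey a ≤ pvKey b) :
    a.toList.length ≤ b.toList.length := by
  rcases Prod.Lex.le_iff.mp h with h1 | ⟨h1, _⟩
  · simp [pvKey, PySem.Str.len] at h1
    simp only [← String.length_toList] at h1
    omega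
  · simp [pvKey, PySem.Str.len] at h1
    simp only [← String.length_toList] at h1
    omega

-- ===== trie lemmas =====

theorem pvChildGet_set : ∀ (ch : PvChildren) (p q : List Char) (v : PvTrie),
    pvChildGet (pvChildSet ch p v) q = if p = q then some v else pvChildGet ch q
  | PvChildren.nil, p, q, v => by
    simp [pvChildSet, pvChildGet]
  | PvChildren.cons k t rest, p, q, v => by
    simp only [pvChildSet]
    by_cases hk : k = p
    · subst hk
      rw [if_pos rfl]
      simp only [pvChildGet]
      by_cases h : k = q
      · simp [h]
      · simp [h]
    · rw [if_neg hk]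
      simp only [pvChildGet, pvChildGet_set rest p q v]
      by_cases h : k = q
      · have hpq : p ≠ q := fun hc => hk (by rw [h, ← hc])
        simp [h, hpq]
      · simp [h]

theorem trieTerm_emptyNode (ps : List (List Char)) :
    trieTerm ps (PvTrie.node none PvChildren.nil) = none := by
  induction ps with
  | nil => rfl
  | cons p rest ih => simpa [trieTerm, pvChildGet] using ih

theorem trieTerm_cons (p : List Char) (qs : List (List Char)) (term : Option String) (ch : PvChildren) :
    trieTerm (p :: qs) (PvTrie.node term ch)
      = trieTerm qs ((pvChildGet ch p).getD (PvTrie.node none PvChildren.nil)) := rfl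

theorem pvPlace_root (seq : String) (parts : List (List Char)) :
    ∀ (t : PvTrie) (i : Nat) (best : Option String),
      (pvPlace seq parts t i best).1 = (pvBest parts t i best).getD seq := by
  induction parts with
  | nil => intro t i best; cases t; rfl
  | cons p rest ih =>
    intro t i best
    cases t with
    | node term ch => simpa [pvPlace, pvBest] using ih _ _ _

theorem pvPlace_trieTerm (seq : String) (parts : List (List Char)) :
    ∀ (t : PvTrie) (i : Nat) (best : Option String) (ps : List (List Char)),
      trieTerm ps (pvPlace seq parts t i best).2
        = if ps = parts then some (pvPlace seq parts t i best).1 else trieTerm ps t := by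
  induction parts with
  | nil =>
    intro t i best ps
    cases t with
    | node term ch =>
      cases ps with
      | nil => simp [pvPlace, trieTerm]
      | cons q qs => simp [pvPlace, trieTerm]
  | cons p rest ih =>
    intro t i best ps
    cases t with
    | node term ch =>
      cases ps with
      | nil => simp [pvPlace, trieTerm]
      | cons q qs =>
        simp only [pvPlace, trieTerm, pvChildGet_set]
        by_cases hq : p = q
        · subst hq
          rw [if_pos rfl]
          simp only [Option.getD_some]
          rw [ih _ _ _ qs]
          by_cases hr : qs = rest
          · subst hr; simp
          · simp [hr]
        · rw [if_neg hq]
          have hne : (q :: qs) ≠ (p :: rest) := by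
            intro hcontra; exact hq (by injection hcontra with h1 _; exact h1.symm)
          rw [if_neg hne]

theorem pvBest_eq_foldl (parts : List (List Char)) :
    ∀ (t : PvTrie) (i : Nat) (best : Option String),
      pvBest parts t i best
        = (List.range parts.length).foldl
            (fun b j => if 0 < i + j then (match trieTerm (parts.take j) t with | some v => some v | none => b) else b)
            best := by
  induction parts with
  | nil => intro t i best; simp [pvBest]
  | cons p rest ih =>
    intro t i best
    cases t with
    | node term ch =>
      rw [show pvBest (p :: rest) (PvTrie.node term ch) i best
            = pvBest rest ((pvChildGet ch p).getD (PvTrie.node none PvChildren.nil)) (i + 1)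
                (if 0 < i then (match term with | some v => some v | none => best) else best) from rfl]
      rw [ih]
      rw [List.length_cons, List.range_succ_eq_map, List.foldl_cons, List.foldl_map]
      have hinit : (if 0 < i + 0 then
            (match trieTerm (List.take 0 (p :: rest)) (PvTrie.node term ch) with
              | some v => some v | none => best) else best)
          = (if 0 < i then (match term with | some v => some v | none => best) else best) := by
        simp only [Nat.add_zero, List.take_zero]
        rfl
      rw [hinit]
      apply PySem.List.foldl_congr_mem
      intro acc j hj
      have h1 : 0 < (i + 1) + j := by omega
      have h2 : 0 < i + (j + 1) := by omega
      rw [if_pos h1, if_pos h2]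
      rw [show List.take (j + 1) (p :: rest) = p :: List.take j rest from rfl, trieTerm_cons]

theorem foldl_lastSome (r : PySem.Dict String String) (l : List String) (b0 : Option String) :
    l.foldl (fun b q => match r.get? q with | some v => some v | none => b) b0
      = match l.reverse.find? (fun q => r.contains q) with | some q => r.get? q | none => b0 := by
  induction l generalizing b0 with
  | nil => simp
  | cons a l ih =>
    simp only [List.foldl_cons, ih, List.reverse_cons, List.find?_append]
    rcases hf : l.reverse.find? (fun q => r.contains q) with _ | v
    · rcases hg : r.get? a with _ | v
      · have hc : r.contains a = false := by rw [PySem.Dict.contains_eq_isSome_get?, hg]; rfl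
        simp [List.find?, hc]
      · have hc : r.contains a = true := by rw [PySem.Dict.contains_eq_isSome_get?, hg]; rfl
        simp [List.find?, hc, hg]
    · simp

-- A's and B's per-sequence roots agree: pvBest over the trie equals the deepest-prefix lookup in r
theorem best_eq_find (t : PvTrie) (r : PySem.Dict String String) (seq : String)
    (hT : pvTrieInv t r) :
    pvBest (PySem.Chars.splitOn seq.toList ['-']) t 0 none
      = match (ppStrs (PySem.Chars.splitOn seq.toList ['-'])).reverse.find? (fun q => r.contains q) with
        | some q => r.get? q
        | none => none := by
  set P := PySem.Chars.splitOn seq.toList ['-'] with hP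
  obtain ⟨p0, tail, hpt⟩ : ∃ p0 tail, P = p0 :: tail := by
    rcases hp : P with _ | ⟨a, b⟩
    · exact absurd (hP ▸ hp) (splitOn_dash_ne_nil seq.toList)
    · exact ⟨a, b, rfl⟩
  have hlen : P.length = tail.length + 1 := by rw [hpt]; rfl
  rw [pvBest_eq_foldl, hlen, List.range_succ_eq_map, List.foldl_cons, List.foldl_map]
  simp only [Nat.add_zero, Nat.lt_irrefl, if_false]
  have hstep : ∀ (b : Option String) (j : Nat), j ∈ List.range tail.length →
      (if 0 < 0 + (j + 1) then (match trieTerm (P.take (j + 1)) t with | some v => some v | none => b) else b)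
        = (match r.get? (String.ofList (PySem.Chars.join ['-'] (P.take (j + 1)))) with | some v => some v | none => b) := by
    intro b j hj
    rw [if_pos (by omega)]
    have hne : P.take (j + 1) ≠ [] := by rw [hpt]; simp
    have hdf : ∀ p ∈ P.take (j + 1), '-' ∉ p := fun p hp =>
      splitOn_dashfree seq.toList p (hP ▸ List.mem_of_mem_take hp)
    have hcanon : PySem.Chars.splitOn (PySem.Chars.join ['-'] (P.take (j + 1))) ['-'] = P.take (j + 1) :=
      canon_split_join _ hne hdf
    have := hT (PySem.Chars.join ['-'] (P.take (j + 1)))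
    rw [hcanon] at this
    rw [this]
  rw [PySem.List.foldl_congr_mem _ _ _ _ hstep]
  have hppl : ppStrs P = (List.range tail.length).map
      (fun j => String.ofList (PySem.Chars.join ['-'] (P.take (j + 1)))) := by
    rw [ppStrs, hlen]
    simp
  have hfin := foldl_lastSome r
    ((List.range tail.length).map (fun j => String.ofList (PySem.Chars.join ['-'] (P.take (j + 1))))) none
  rw [List.foldl_map] at hfin
  rw [hppl]
  exact hfin

-- one parallel step: chains stay equal and both invariants are preserved
theorem step_eq (L done rest : List String) (seq : String)
    (c : PySem.Dict String (List String)) (r : PySem.Dict String String) (t : PvTrie)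
    (hPW : L.Pairwise (fun a b => pvKey a ≤ pvKey b)) (hND : L.Nodup)
    (hL : L = done ++ seq :: rest) (hInv : pvInv done c r) (hT : pvTrieInv t r) :
    (bStep (t, c) seq).2 = (aStep (c, r) seq).1
      ∧ pvTrieInv (bStep (t, c) seq).1 (aStep (c, r) seq).2
      ∧ pvInv (done ++ [seq]) (aStep (c, r) seq).1 (aStep (c, r) seq).2 := by
  obtain ⟨hk1, hk2, hk3, hk4, hk5, hk6⟩ := hInv
  have hseqdone : seq ∉ done := by
    have h := hND
    rw [hL] at h
    have hdisj := (List.nodup_append.mp h).2.2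
    intro hmem
    exact hdisj seq hmem seq (by simp) rfl
  have hdone_le : ∀ d ∈ done, pvKey d ≤ pvKey seq := by
    have h := hPW
    rw [hL] at h
    intro d hd
    exact (List.pairwise_append.mp h).2.2 d hd seq (by simp)
  set parts := PySem.Chars.splitOn seq.toList ['-'] with hparts
  have hafind : aFindPrefix r parts (PySem.List.pyRange ((parts.length : Int) - 1) 0 (-1))
      = (ppStrs parts).reverse.find? (fun q => r.contains q) := aFind_eq r parts
  have hroot : (pvPlace seq parts t 0 none).1
      = (match (ppStrs parts).reverse.find? (fun q => r.contains q) with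
          | some q => r.get? q | none => none).getD seq := by
    rw [pvPlace_root, best_eq_find t r seq hT]
  have hrnot : r.contains seq = false := by
    rw [PySem.Dict.contains_eq_decide_mem_keys, hk1]
    simpa using hseqdone
  -- the trie invariant after pvPlace + r.insert, for any inserted root value v
  have hTrie' : ∀ v : String, (pvPlace seq parts t 0 none).1 = v →
      pvTrieInv (pvPlace seq parts t 0 none).2 (r.insert seq v) := by
    intro v hv s
    rw [pvPlace_trieTerm, PySem.Dict.get?_insert]
    by_cases h : PySem.Chars.splitOn s ['-'] = parts
    · have hs : s = seq.toList := by
        have h1 := joinDash_splitOn s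
        rw [h, hparts, joinDash_splitOn] at h1
        exact h1.symm
      rw [if_pos h, if_pos (by rw [hs, String.ofList_toList]), hv]
    · have hns : String.ofList s ≠ seq := by
        intro hcontra
        have : s = seq.toList := by rw [← String.toList_ofList (l := s), hcontra]
        exact h (by rw [this])
      rw [if_neg h, if_neg hns]
      exact hT s
  rcases hres : (ppStrs parts).reverse.find? (fun q => r.contains q) with _ | q
  -- ===== case: no proper prefix found =====
  · have hcnot : c.contains seq = false := by
      rw [PySem.Dict.contains_eq_decide_mem_keys]
      simpa using fun h => hseqdone (hk4 seq h)
    have hrootv : (pvPlace seq parts t 0 none).1 = seq := by rw [hroot, hres]; rfl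
    have hA : aStep (c, r) seq = (c.insert seq [seq], r.insert seq seq) := by
      unfold aStep
      dsimp only
      rw [← hparts, hafind, hres]
    have hBc : (bStep (t, c) seq).2 = c.insert seq [seq] := by
      unfold bStep
      dsimp only
      rw [← hparts, hrootv]
      rw [PySem.Dict.modify, PySem.Dict.getD_of_not_contains _ _ hcnot, List.nil_append]
    have hBt : (bStep (t, c) seq).1 = (pvPlace seq parts t 0 none).2 := rfl
    refine ⟨by rw [hBc, hA], by rw [hBt, hA]; exact hTrie' seq hrootv, ?_⟩
    rw [hA]
    dsimp only
    refine ⟨?_, ?_, ?_, ?_, ?_, ?_⟩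
    · rw [PySem.Dict.keys_insert_of_not_contains r seq hrnot, hk1]
    · intro p hp x hx
      rw [PySem.Dict.items_insert_of_not_contains _ _ hcnot] at hp
      rcases List.mem_append.mp hp with h1 | h2
      · exact List.mem_append_left _ (hk2 p h1 x hx)
      · simp at h2
        subst h2
        simp at hx
        simp [hx]
    · intro p hp
      rw [PySem.Dict.items_insert_of_not_contains _ _ hcnot] at hp
      rcases List.mem_append.mp hp with h1 | h2
      · exact hk3 p h1
      · simp at h2
        subst h2
        simp
    · intro k hkk
      rw [PySem.Dict.keys_insert_of_not_contains c _ hcnot] at hkk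
      rcases List.mem_append.mp hkk with h1 | h2
      · exact List.mem_append_left _ (hk4 k h1)
      · simp at h2
        simp [h2]
    · intro v hv
      rw [PySem.Dict.keys_insert_of_not_contains c _ hcnot]
      rcases PySem.Dict.mem_values_insert r seq seq v hv with rfl | h2
      · simp
      · exact List.mem_append_left _ (hk5 v h2)
    · rw [PySem.Dict.keys_insert_of_not_contains c _ hcnot]
      refine List.Nodup.append hk6 (by simp) ?_
      intro x hx hx'
      simp at hx'
      subst hx'
      exact hseqdone (hk4 x hx)
  -- ===== case: deepest proper prefix q found =====
  · have hcq : r.contains q = true := by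
      have := List.find?_some hres
      simpa using this
    obtain ⟨v, hv⟩ : ∃ v, r.get? q = some v := by
      have h := PySem.Dict.contains_eq_isSome_get? r q
      rw [hcq] at h
      exact Option.isSome_iff_exists.mp h.symm
    have hqv_items : (q, v) ∈ r.items := PySem.Dict.mem_items_of_get?_eq_some r hv
    have hvvals : v ∈ r.values := by
      rw [PySem.Dict.values]
      exact List.mem_map_of_mem hqv_items
    have hvk : v ∈ c.keys := hk5 v hvvals
    have hcv : c.contains v = true := (PySem.Dict.contains_iff_mem_keys c v).mpr hvk
    obtain ⟨w, hw⟩ : ∃ w, c.get? v = some w := by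
      have h := PySem.Dict.contains_eq_isSome_get? c v
      rw [hcv] at h
      exact Option.isSome_iff_exists.mp h.symm
    have hvw_items : (v, w) ∈ c.items := PySem.Dict.mem_items_of_get?_eq_some c hw
    have hgD : c.getD v [] = w := by
      rw [PySem.Dict.getD_eq_get?_getD, hw]
      rfl
    have hrootv : (pvPlace seq parts t 0 none).1 = v := by
      rw [hroot, hres]
      show (r.get? q).getD seq = v
      rw [hv]
      rfl
    have hA : aStep (c, r) seq = (c.insert v (w ++ [seq]), r.insert seq v) := by
      unfold aStep
      dsimp only
      rw [← hparts, hafind, hres]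
      simp only [hv, Option.getD_some, PySem.Dict.modify, hgD]
    have hBc : (bStep (t, c) seq).2 = c.insert v (w ++ [seq]) := by
      unfold bStep
      dsimp only
      rw [← hparts, hrootv]
      simp only [PySem.Dict.modify, hgD]
    have hBt : (bStep (t, c) seq).1 = (pvPlace seq parts t 0 none).2 := rfl
    refine ⟨by rw [hBc, hA], by rw [hBt, hA]; exact hTrie' v hrootv, ?_⟩
    rw [hA]
    dsimp only
    have hwdone : ∀ x ∈ w, x ∈ done := fun x hx => hk2 (v, w) hvw_items x hx
    refine ⟨?_, ?_, ?_, ?_, ?_, ?_⟩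
    · rw [PySem.Dict.keys_insert_of_not_contains r v hrnot, hk1]
    · intro p hp x hx
      rw [PySem.Dict.items_insert_of_contains _ _ hcv] at hp
      rcases List.mem_map.mp hp with ⟨p0', hp0, rfl⟩
      by_cases hbe : p0'.1 == v
      · simp only [hbe, if_pos] at hx ⊢
        rcases List.mem_append.mp hx with h1 | h2
        · exact List.mem_append_left _ (hwdone x h1)
        · simp at h2
          simp [h2]
      · simp only [hbe] at hx ⊢
        simp only [Bool.false_eq_true, if_false] at hx
        exact List.mem_append_left _ (hk2 p0' hp0 x hx)
    · intro p hp
      rw [PySem.Dict.items_insert_of_contains _ _ hcv] at hp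
      rcases List.mem_map.mp hp with ⟨p0', hp0, rfl⟩
      by_cases hbe : p0'.1 == v
      · simp only [hbe, if_pos]
        rw [List.pairwise_append]
        refine ⟨hk3 (v, w) hvw_items, by simp, ?_⟩
        intro x hx y hy
        simp at hy
        subst hy
        have hxd : x ∈ done := hwdone x hx
        have hle := keyle_strlen (hdone_le x hxd)
        simp only [PySem.Str.len]
        have e1 := String.length_toList (s := x)
        have e2 := String.length_toList (s := y)
        omega
      · simp only [hbe, Bool.false_eq_true, if_false]
        exact hk3 p0' hp0
    · intro k hkk
      rw [PySem.Dict.keys_insert_of_contains c _ hcv] at hkk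
      exact List.mem_append_left _ (hk4 k hkk)
    · intro x hx
      rw [PySem.Dict.keys_insert_of_contains c _ hcv]
      rcases PySem.Dict.mem_values_insert r seq v x hx with rfl | h2
      · exact hvk
      · exact hk5 x h2
    · rw [PySem.Dict.keys_insert_of_contains c _ hcv]
      exact hk6

theorem fold_eq (L : List String)
    (hPW : L.Pairwise (fun a b => pvKey a ≤ pvKey b)) (hND : L.Nodup) :
    ∀ (todo done : List String) (c : PySem.Dict String (List String)) (r : PySem.Dict String String)
      (t : PvTrie),
      L = done ++ todo → pvInv done c r → pvTrieInv t r →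
      (todo.foldl bStep (t, c)).2 = (todo.foldl aStep (c, r)).1
        ∧ pvInv (done ++ todo) (todo.foldl aStep (c, r)).1 (todo.foldl aStep (c, r)).2 := by
  intro todo
  induction todo with
  | nil => intro done c r t hL hInv _; simpa using hInv
  | cons seq rest ih =>
    intro done c r t hL hInv hT
    obtain ⟨hstepc, hstept, hInv'⟩ := step_eq L done rest seq c r t hPW hND hL hInv hT
    have hL' : L = (done ++ [seq]) ++ rest := by simpa [List.append_assoc] using hL
    obtain ⟨heq, hfin⟩ := ih (done ++ [seq]) (aStep (c, r) seq).1 (aStep (c, r) seq).2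
      (bStep (t, c) seq).1 hL' hInv' hstept
    constructor
    · simp only [List.foldl_cons]
      rw [show bStep (t, c) seq = ((bStep (t, c) seq).1, (aStep (c, r) seq).1) from by
            rw [← hstepc]]
      rw [show aStep (c, r) seq = ((aStep (c, r) seq).1, (aStep (c, r) seq).2) from rfl] at heq ⊢
      exact heq
    · simpa [List.append_assoc] using hfin

theorem insert_self (d : PySem.Dict String (List String)) (hnd : d.keys.Nodup)
    {k : String} {v : List String} (hv : (k, v) ∈ d.items) : d.insert k v = d := by
  apply PySem.Dict.ext
  have hc : d.contains k = true :=
    (PySem.Dict.contains_iff_mem_keys d k).mpr (PySem.Dict.mem_keys_of_mem_items d hv)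
  rw [PySem.Dict.items_insert_of_contains _ _ hc]
  nth_rewrite 2 [← List.map_id d.items]
  apply List.map_congr_left
  intro p hp
  by_cases hk : p.1 = k
  · have h1 : d.get? k = some v := PySem.Dict.get?_of_mem_items d hv hnd
    have h2 : d.get? p.1 = some p.2 := PySem.Dict.get?_of_mem_items d (by simpa using hp) hnd
    rw [hk] at h2
    rw [h1] at h2
    have : p = (k, v) := by
      rcases p with ⟨pk, pv⟩
      simp_all
    simp [this]
  · simp [hk]

theorem final_fold_id (c : PySem.Dict String (List String)) (hnd : c.keys.Nodup)
    (hs : ∀ p ∈ c.items, p.2.Pairwise (fun a b => PySem.Str.len a ≤ PySem.Str.len b)) :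
    ∀ ks : List String, (∀ k ∈ ks, k ∈ c.keys) →
      ks.foldl (fun d root => d.modify root [] (fun l => PySem.List.sorted l PySem.Str.len false)) c = c := by
  intro ks
  induction ks with
  | nil => intro _; rfl
  | cons k ks ih =>
    intro hk
    have hkmem : k ∈ c.keys := hk k (by simp)
    have hc : c.contains k = true := (PySem.Dict.contains_iff_mem_keys c k).mpr hkmem
    obtain ⟨v, hv⟩ : ∃ v, c.get? k = some v := by
      have := PySem.Dict.contains_eq_isSome_get? c k
      rw [hc] at this
      exact Option.isSome_iff_exists.mp this.symm
    have hitems : (k, v) ∈ c.items := PySem.Dict.mem_items_of_get?_eq_some c hv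
    have hstep : c.modify k [] (fun l => PySem.List.sorted l PySem.Str.len false) = c := by
      rw [PySem.Dict.modify]
      rw [PySem.Dict.getD_eq_get?_getD, hv]
      simp only [Option.getD_some]
      rw [PySem.List.sorted_eq_self_of_pairwise _ _ (hs (k, v) hitems)]
      exact insert_self c hnd hitems
    simp only [List.foldl_cons, hstep]
    exact ih (fun x hx => hk x (by simp [hx]))

-- ===== VERDICT (by name: the statement is the Claim_ definition above) =====
theorem build_chains_from_signs_spec : Claim_equal_build_chains_from_signs := by
  intro xs _
  unfold Spec_build_chains_from_signs build_chains_from_signs build_chains_from_signs_alt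
  dsimp only []
  have hsort := sorted2_eq_sorted_lex (PySem.Set.ofList xs)
  set L := PySem.List.sorted2 (PySem.Set.ofList xs) PySem.Str.len (fun s => s) false with hLdef
  have hPW : L.Pairwise (fun a b => pvKey a ≤ pvKey b) := by
    rw [hsort]
    exact PySem.List.sorted_pairwise _ _
  have hperm : L.Perm (PySem.Set.ofList xs) := PySem.List.sorted2_perm _ _ _ _
  have hND : L.Nodup := (hperm.nodup_iff).mpr (PySem.Set.nodup_ofList xs)
  have hInv0 : pvInv [] PySem.Dict.empty PySem.Dict.empty := by
    refine ⟨?_, ?_, ?_, ?_, ?_, ?_⟩ <;> simp [PySem.Dict.empty, PySem.Dict.keys, PySem.Dict.values]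
  have hT0 : pvTrieInv (PvTrie.node none PvChildren.nil) PySem.Dict.empty := by
    intro s
    rw [trieTerm_emptyNode]
    simp [PySem.Dict.empty, PySem.Dict.get?]
  obtain ⟨heq, hfin⟩ := fold_eq L hPW hND L [] PySem.Dict.empty PySem.Dict.empty
    (PvTrie.node none PvChildren.nil) rfl hInv0 hT0
  obtain ⟨_, _, hsorted, _, _, hnd⟩ := hfin
  rw [heq]
  congr 1
  exact final_fold_id _ hnd hsorted _ (fun k hk => hk)
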